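-- pv_equiv track=rewrite | github.com/shoeffner/pandoc-source-exec | pandoc_source_exec.py | filter_lines
-- ===== SOURCE A (Python) =====
-- def filter_lines(code, line_spec):
--     """Removes all lines not matching the line_spec.
--
--     Args:
--         code The code to filter
--         line_spec The line specification. This should be a comma-separated
--                   string of lines or line ranges, e.g. 1,2,5-12,15
--                   If a line range starts with -, all lines up to this line are
--                   included.
--                   If a line range ends with -, all lines from this line on are
--                   included.
--                   All lines mentioned (ranges are inclusive) are used.
--     Returns:
--         Only the specified lines.
--     """
--     code_lines = code.splitlines()
--
--     line_specs = [line_denom.strip() for line_denom in line_spec.split(',')]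
--
--     single_lines = set(map(int, filter(lambda line: '-' not in line, line_specs)))
--     line_ranges = set(filter(lambda line: '-' in line, line_specs))
--
--     for line_range in line_ranges:
--         begin, end = line_range.split('-')
--         if not begin:
--             begin = 1
--         if not end:
--             end = len(code_lines)
--         single_lines.update(range(int(begin), int(end) + 1))
--
--     keep_lines = []
--     for line_number, line in enumerate(code_lines, 1):
--         if line_number in single_lines:
--             keep_lines.append(line)
--
--     return '\n'.join(keep_lines)
-- ===== SOURCE B (Python) =====
-- def filter_lines(code, line_spec):
--     """Removes all lines not matching the line_spec (see A's docstring)."""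
--     lines = code.splitlines()
--     intervals = []
--     for token in line_spec.split(','):
--         token = token.strip()
--         if '-' in token:
--             begin, end = token.split('-')
--             intervals.append((int(begin) if begin else 1,
--                               int(end) if end else len(lines)))
--         else:
--             n = int(token)
--             intervals.append((n, n))
--     return '\n'.join(line for number, line in enumerate(lines, 1)
--                      if any(b <= number <= e for b, e in intervals))
-- ===== Notes on version B (the rewrite author's own statement) =====
-- stated objective: simpler
-- what changed: B parses the spec once into a list of (begin,end) intervals ((n,n) for bare lines) and keeps a line when any interval covers its 1-based number, instead of A's materialising every range into a set of individual line numbers and testing set membership.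
import Mathlib
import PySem

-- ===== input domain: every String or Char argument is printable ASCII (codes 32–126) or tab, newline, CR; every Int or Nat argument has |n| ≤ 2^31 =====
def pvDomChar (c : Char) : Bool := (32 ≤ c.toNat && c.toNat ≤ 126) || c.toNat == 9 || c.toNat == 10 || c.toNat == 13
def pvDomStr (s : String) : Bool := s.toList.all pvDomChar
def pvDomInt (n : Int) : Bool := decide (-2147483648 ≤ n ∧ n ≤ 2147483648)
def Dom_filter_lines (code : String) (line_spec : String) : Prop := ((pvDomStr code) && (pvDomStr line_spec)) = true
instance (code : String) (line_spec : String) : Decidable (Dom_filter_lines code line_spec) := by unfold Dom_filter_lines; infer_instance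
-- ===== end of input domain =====

-- B replaces A's set of all individual line numbers by a once-parsed list of inclusive intervals checked with any(); same return value on every spec on which A returns.

-- ===== PORT A =====
def filter_lines (code : String) (line_spec : String) : String :=
  let code_lines := PySem.Str.splitlines code
  let line_specs := (((PySem.Str.split? line_spec ",").getD [])).map PySem.Str.strip
  let single_lines : PySem.Set Int :=
    PySem.Set.ofList ((line_specs.filter (fun t => !(PySem.Str.isIn "-" t))).map
      (fun t => (PySem.Int.ofStr? t).getD 0))   -- getD 0 total form; Pre_ demands int() succeeds
  let line_ranges : PySem.Set String :=
    PySem.Set.ofList (line_specs.filter (fun t => PySem.Str.isIn "-" t))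
  let single_lines := line_ranges.foldl (fun s r =>
      let parts := ((PySem.Str.split? r "-").getD [])
      let b := parts.getD 0 ""                  -- Pre_ demands exactly two parts
      let e := parts.getD 1 ""
      let bi : Int := if b = "" then 1 else (PySem.Int.ofStr? b).getD 0
      let ei : Int := if e = "" then (code_lines.length : Int) else (PySem.Int.ofStr? e).getD 0
      PySem.Set.update s (PySem.List.pyRange bi (ei + 1) 1)) single_lines
  let keep_lines := (PySem.List.enumerate code_lines 1).foldl
      (fun acc p => if PySem.Set.contains single_lines p.1 then acc ++ [p.2] else acc) []
  PySem.Str.join "\n" keep_lines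

-- ===== PORT B =====
def filter_lines_alt (code : String) (line_spec : String) : String :=
  let lines := PySem.Str.splitlines code
  let intervals : List (Int × Int) := (((PySem.Str.split? line_spec ",").getD [])).map (fun raw =>
    let t := PySem.Str.strip raw
    if PySem.Str.isIn "-" t then
      let parts := ((PySem.Str.split? t "-").getD [])
      let b := parts.getD 0 ""
      let e := parts.getD 1 ""
      ((if b = "" then 1 else (PySem.Int.ofStr? b).getD 0),
       (if e = "" then (lines.length : Int) else (PySem.Int.ofStr? e).getD 0))
    else
      let n := (PySem.Int.ofStr? t).getD 0
      (n, n))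
  PySem.Str.join "\n"
    (((PySem.List.enumerate lines 1).filter
        (fun p => intervals.any (fun iv => decide (iv.1 ≤ p.1 ∧ p.1 ≤ iv.2)))).map (·.2))

-- ===== PRECONDITION & SPEC =====
-- Pre_ excludes exactly the specs on which the Python A raises ValueError: a token whose
-- int() fails, or a range token that does not split into exactly two parts (B raises there too).
def Pre_filter_lines (code : String) (line_spec : String) : Prop :=
  ∀ t ∈ (((PySem.Str.split? line_spec ",").getD [])).map PySem.Str.strip,
    if PySem.Str.isIn "-" t = true then
      (((PySem.Str.split? t "-").getD [])).length = 2 ∧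
      (((((PySem.Str.split? t "-").getD [])).getD 0 "") = "" ∨
        (PySem.Int.ofStr? ((((PySem.Str.split? t "-").getD [])).getD 0 "")).isSome = true) ∧
      (((((PySem.Str.split? t "-").getD [])).getD 1 "") = "" ∨
        (PySem.Int.ofStr? ((((PySem.Str.split? t "-").getD [])).getD 1 "")).isSome = true)
    else (PySem.Int.ofStr? t).isSome = true
instance (code : String) (line_spec : String) : Decidable (Pre_filter_lines code line_spec) := by
  unfold Pre_filter_lines; infer_instance

def pvWitness_filter_lines : String × String := ("a\nb\nc\nd", "1, 3-")

def Spec_filter_lines (code : String) (line_spec : String) (out : String) : Prop := out = filter_lines_alt code line_spec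
instance (code : String) (line_spec : String) (out : String) : Decidable (Spec_filter_lines code line_spec out) := by unfold Spec_filter_lines; infer_instance

-- ===== CLAIM (what is proved, stated in full; the proofs are below) =====
def Claim_equal_filter_lines : Prop := ∀ (code : String) (line_spec : String), Dom_filter_lines code line_spec → Pre_filter_lines code line_spec → Spec_filter_lines code line_spec (filter_lines code line_spec)

-- ===== LEMMAS AND PROOFS =====

theorem mem_foldl_update {α β : Type} [BEq β] [LawfulBEq β]
    (l : List α) (g : α → List β) (s : PySem.Set β) (y : β) :
    y ∈ l.foldl (fun s r => PySem.Set.update s (g r)) s ↔ y ∈ s ∨ ∃ r ∈ l, y ∈ g r := by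
  induction l generalizing s with
  | nil => simp
  | cons a rest ih =>
    simp only [List.foldl_cons, ih, PySem.Set.mem_update, List.mem_cons]
    constructor
    · rintro ((h | h) | ⟨r, hr, hy⟩)
      · exact Or.inl h
      · exact Or.inr ⟨a, Or.inl rfl, h⟩
      · exact Or.inr ⟨r, Or.inr hr, hy⟩
    · rintro (h | ⟨r, (rfl | hr), hy⟩)
      · exact Or.inl (Or.inl h)
      · exact Or.inl (Or.inr hy)
      · exact Or.inr ⟨r, hr, hy⟩

-- ===== VERDICT (by name: the statement is the Claim_ definition above) =====
set_option maxHeartbeats 1000000 in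
theorem filter_lines_spec : Claim_equal_filter_lines := by
  intro code line_spec _ _
  unfold Spec_filter_lines filter_lines filter_lines_alt
  simp only [PySem.List.foldl_append_if, List.nil_append]
  apply congrArg
  apply congrArg
  apply List.filter_congr
  intro p hp
  rw [Bool.eq_iff_iff]
  simp only [PySem.Set.contains_iff, mem_foldl_update, PySem.Set.mem_ofList,
    List.mem_map, List.mem_filter, PySem.List.mem_pyRange_one, List.any_eq_true,
    decide_eq_true_iff]
  simp only [exists_exists_and_eq_and]
  constructor
  · rintro (⟨t, ⟨⟨raw, hraw, rfl⟩, hnd⟩, hn⟩ | ⟨r, ⟨⟨raw, hraw, rfl⟩, hd⟩, hlo, hhi⟩)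
    · refine ⟨raw, hraw, ?_⟩
      rw [if_neg (by simp at hnd; simp [hnd])]
      dsimp only
      omega
    · refine ⟨raw, hraw, ?_⟩
      rw [if_pos hd]
      dsimp only
      omega
  · rintro ⟨raw, hraw, hc⟩
    by_cases hd : PySem.Str.isIn "-" (PySem.Str.strip raw) = true
    · rw [if_pos hd] at hc
      dsimp only at hc
      exact Or.inr ⟨_, ⟨⟨raw, hraw, rfl⟩, hd⟩, hc.1, by omega⟩
    · rw [if_neg hd] at hc
      dsimp only at hc
      exact Or.inl ⟨_, ⟨⟨raw, hraw, rfl⟩, by simp at hd; simp [hd]⟩, by omega⟩
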